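-- pv_equiv track=rewrite | github.com/SindujaVijayakumar/FindIDInDiagMatrix | FindID.py | solution
-- ===== SOURCE A (Python) =====
-- def solution(x, y):
--
--     # ID at position (x,1) is the sum of all numbers from 1 to x
--     val_x = (x * (x + 1)) >> 1
--     id = val_x # if y == 1
--
--     if y > 1:
--
--         # ID at position (x,2) is ID(x,0) + x
--         id += x
--         temp = x
--
--         # if y >= 3, ID(x,y) = ID(x,2) + sum(x+1 to x+n) where
--         # n = (y-1) - 2
--         for y_in in range(2, y):
--             temp += 1
--             id += temp
--
--     return str(id)
-- ===== SOURCE B (Python) =====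
-- def solution(x, y):
--     # Closed form: diagonal ID(x,y) = T(x+y-2) + x for y >= 2, T(x) for y <= 1,
--     # where T(n) = n*(n+1)//2.
--     if y <= 1:
--         return str(x * (x + 1) // 2)
--     n = x + y - 2
--     return str(n * (n + 1) // 2 + x)
-- ===== Notes on version B (the rewrite author's own statement) =====
-- stated objective: faster
-- what changed: Replaced the O(y) accumulation loop over range(2, y) with a closed-form triangular-number formula T(x+y-2)+x evaluated in O(1).
import Mathlib
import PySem

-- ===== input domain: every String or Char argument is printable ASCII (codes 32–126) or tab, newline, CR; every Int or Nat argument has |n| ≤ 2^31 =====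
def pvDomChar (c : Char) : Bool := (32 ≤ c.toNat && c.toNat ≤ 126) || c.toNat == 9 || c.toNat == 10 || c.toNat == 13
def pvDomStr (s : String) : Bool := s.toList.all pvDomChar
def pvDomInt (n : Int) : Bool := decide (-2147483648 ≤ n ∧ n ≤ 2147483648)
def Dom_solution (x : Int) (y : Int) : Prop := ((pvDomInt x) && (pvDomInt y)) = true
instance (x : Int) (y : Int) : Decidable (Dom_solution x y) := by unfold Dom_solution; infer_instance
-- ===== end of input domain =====

-- B replaces A's O(y) accumulation loop with a closed-form triangular-number formula (objective: faster).

-- ===== PORT A =====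
-- '(x*(x+1)) >> 1' is Python's arithmetic right shift by 1, exactly floor division by 2.
def solution (x : Int) (y : Int) : String :=
  let val_x : Int := PySem.Int.floordiv (x * (x + 1)) 2
  let id0 : Int := val_x
  if y > 1 then
    let s := (PySem.List.pyRange 2 y 1).foldl
      (fun (s : Int × Int) (_ : Int) => (s.1 + 1, s.2 + (s.1 + 1))) (x, id0 + x)
    PySem.Int.toStr s.2
  else
    PySem.Int.toStr id0

-- ===== PORT B =====
def solution_alt (x : Int) (y : Int) : String :=
  if y ≤ 1 then
    PySem.Int.toStr (PySem.Int.floordiv (x * (x + 1)) 2)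
  else
    let n : Int := x + y - 2
    PySem.Int.toStr (PySem.Int.floordiv (n * (n + 1)) 2 + x)

-- ===== PRECONDITION & SPEC =====
def Spec_solution (x : Int) (y : Int) (out : String) : Prop := out = solution_alt x y
instance (x : Int) (y : Int) (out : String) : Decidable (Spec_solution x y out) := by unfold Spec_solution; infer_instance

-- ===== CLAIM (what is proved, stated in full; the proofs are below) =====
def Claim_equal_solution : Prop := ∀ (x : Int) (y : Int), Dom_solution x y → Spec_solution x y (solution x y)

-- ===== LEMMAS AND PROOFS =====

-- A's loop, folded over any list, adds an arithmetic series; stated multiplied by 2 to stay division-free.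
theorem loop_closed (l : List Int) (t i : Int) :
    (l.foldl (fun (s : Int × Int) (_ : Int) => (s.1 + 1, s.2 + (s.1 + 1))) (t, i)) =
      (t + l.length,
       (2 * i + (l.length : Int) * (2 * t + l.length + 1)) / 2) := by
  induction l generalizing t i with
  | nil => simp
  | cons a l ih =>
    simp only [List.foldl_cons, List.length_cons, ih, Prod.mk.injEq]
    refine ⟨by push_cast; ring, ?_⟩
    congr 1
    push_cast
    ring

theorem solution_spec_aux (x y : Int) : solution x y = solution_alt x y := by
  unfold solution solution_alt
  by_cases h : y > 1
  · have hfd : ∀ a : Int, PySem.Int.floordiv a 2 = a / 2 :=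
      fun a => PySem.Int.floordiv_eq_ediv_of_pos (by norm_num)
    have hL : (((y - 2).toNat : Int)) = y - 2 := by omega
    rw [if_pos h, if_neg (by omega)]
    simp only [hfd, loop_closed, PySem.List.length_pyRange_one, hL]
    congr 1
    have hx : 2 * (x * (x + 1) / 2) = x * (x + 1) :=
      Int.mul_ediv_cancel' (x.even_mul_succ_self).two_dvd
    set n : Int := x + y - 2 with hn
    have hnn : 2 * (n * (n + 1) / 2) = n * (n + 1) :=
      Int.mul_ediv_cancel' (n.even_mul_succ_self).two_dvd
    have hnum : 2 * (x * (x + 1) / 2 + x) + (y - 2) * (2 * x + (y - 2) + 1) =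
        2 * (n * (n + 1) / 2 + x) := by
      rw [hn] at hnn ⊢
      linear_combination hx - hnn
    omega
  · rw [if_neg h, if_pos (by omega)]

-- ===== VERDICT (by name: the statement is the Claim_ definition above) =====
theorem solution_spec : Claim_equal_solution := by
  intro x y _
  exact solution_spec_aux x y
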